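-- pv_equiv track=rewrite | github.com/Minsik113/Algorithm-practice | 프로그래머스_코딩테스트입문_하루4문제/Day10_조건문등등/공 던지기.py | solution
-- ===== SOURCE A (Python) =====
-- def solution(numbers, k):
--     answer = 0
--     arr = []
--     while True:
--         if len(arr) > 2000:
--             break
--         arr.extend(numbers)
--     return arr[2*k-2]
-- ===== SOURCE B (Python) =====
-- def solution(numbers, k):
--     return numbers[(2 * k - 2) % len(numbers)]
-- ===== Notes on version B (the rewrite author's own statement) =====
-- stated objective: simpler
-- what changed: A materialises the numbers list repeated until its length exceeds 2000 and then indexes into that array; B is a single expression indexing the original list at (2*k-2) mod len(numbers), with no list building.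
import Mathlib
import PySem

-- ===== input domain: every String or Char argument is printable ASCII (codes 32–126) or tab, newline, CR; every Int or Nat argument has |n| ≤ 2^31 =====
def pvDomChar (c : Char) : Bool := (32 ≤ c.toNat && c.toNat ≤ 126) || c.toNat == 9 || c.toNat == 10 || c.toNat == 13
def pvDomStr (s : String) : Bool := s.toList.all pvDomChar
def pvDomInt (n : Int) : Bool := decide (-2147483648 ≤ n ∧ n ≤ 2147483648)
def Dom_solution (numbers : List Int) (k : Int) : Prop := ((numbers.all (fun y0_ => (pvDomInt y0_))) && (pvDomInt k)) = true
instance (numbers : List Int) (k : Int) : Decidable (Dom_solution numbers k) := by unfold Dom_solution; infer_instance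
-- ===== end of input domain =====

-- B replaces A's materialised 2000+-element repetition of `numbers` with a one-line
-- modulo index into `numbers` itself (simpler: no list building); return-value equivalence.

-- ===== PORT A =====
-- the while-True loop: extend arr by numbers until len(arr) > 2000 (2002 iterations always
-- suffice when numbers ≠ []; on numbers = [] Python diverges, which Pre_ excludes)
def buildArr (numbers : List Int) : Nat → List Int → List Int
  | 0, arr => arr
  | fuel + 1, arr => if arr.length > 2000 then arr else buildArr numbers fuel (arr ++ numbers)

def solution (numbers : List Int) (k : Int) : Int :=
  PySem.List.pyGetD (buildArr numbers 2002 []) (2 * k - 2) 0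

-- ===== PORT B =====
def solution_alt (numbers : List Int) (k : Int) : Int :=
  PySem.List.pyGetD numbers (PySem.Int.mod (2 * k - 2) (numbers.length : Int)) 0

-- ===== PRECONDITION & SPEC =====
-- Pre_ excludes numbers = [] (A loops forever) and indices 2*k-2 outside the built array
-- of length numbers.length * (2000 / numbers.length + 1) (A raises IndexError there).
def Pre_solution (numbers : List Int) (k : Int) : Prop :=
  numbers ≠ [] ∧
  -((numbers.length * (2000 / numbers.length + 1) : Nat) : Int) ≤ 2 * k - 2 ∧
  2 * k - 2 < ((numbers.length * (2000 / numbers.length + 1) : Nat) : Int)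
instance (numbers : List Int) (k : Int) : Decidable (Pre_solution numbers k) := by
  unfold Pre_solution; infer_instance

def pvWitness_solution : List Int × Int := ([1, 2], 1)

def Spec_solution (numbers : List Int) (k : Int) (out : Int) : Prop := out = solution_alt numbers k
instance (numbers : List Int) (k : Int) (out : Int) : Decidable (Spec_solution numbers k out) := by unfold Spec_solution; infer_instance

-- ===== CLAIM (what is proved, stated in full; the proofs are below) =====
def Claim_equal_solution : Prop := ∀ (numbers : List Int) (k : Int), Dom_solution numbers k → Pre_solution numbers k → Spec_solution numbers k (solution numbers k)

-- ===== LEMMAS AND PROOFS =====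

def rep (numbers : List Int) (c : Nat) : List Int := (List.replicate c numbers).flatten

theorem rep_length (numbers : List Int) (c : Nat) :
    (rep numbers c).length = c * numbers.length := by
  induction c with
  | zero => simp [rep]
  | succ c ih =>
      simp only [rep, List.replicate_succ, List.flatten_cons, List.length_append] at *
      rw [ih]; ring

theorem rep_append (numbers : List Int) (c : Nat) :
    rep numbers c ++ numbers = rep numbers (c + 1) := by
  induction c with
  | zero => simp [rep]
  | succ c ih =>
      simp only [rep, List.replicate_succ, List.flatten_cons] at *
      rw [List.append_assoc, ih]

theorem build_eq (numbers : List Int) (h : numbers ≠ []) :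
    ∀ fuel c, 2000 / numbers.length + 1 ≤ c + fuel → c ≤ 2000 / numbers.length + 1 →
      buildArr numbers fuel (rep numbers c) = rep numbers (2000 / numbers.length + 1) := by
  have hn : 0 < numbers.length := List.length_pos_iff.mpr h
  intro fuel
  induction fuel with
  | zero =>
      intro c h1 h2
      have : c = 2000 / numbers.length + 1 := by omega
      rw [this]; rfl
  | succ fuel ih =>
      intro c h1 h2
      rw [buildArr]
      by_cases hc : (rep numbers c).length > 2000
      · rw [if_pos hc]
        rw [rep_length] at hc
        have hq : 2000 / numbers.length < c := (Nat.div_lt_iff_lt_mul hn).mpr (by omega)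
        rw [show c = 2000 / numbers.length + 1 from by omega]
      · rw [if_neg hc]
        rw [rep_append]
        rw [rep_length] at hc
        have hle : c ≤ 2000 / numbers.length := (Nat.le_div_iff_mul_le hn).mpr (by omega)
        exact ih (c + 1) (by omega) (by omega)

theorem rep_getElem? (numbers : List Int) (h : numbers ≠ []) :
    ∀ m j, j < m * numbers.length → (rep numbers m)[j]? = numbers[j % numbers.length]? := by
  have hn : 0 < numbers.length := List.length_pos_iff.mpr h
  intro m
  induction m with
  | zero => intro j hj; omega
  | succ m ih =>
      intro j hj
      have hrep : rep numbers (m + 1) = numbers ++ rep numbers m := by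
        simp [rep, List.replicate_succ, List.flatten_cons]
      rw [hrep]
      by_cases hjn : j < numbers.length
      · rw [List.getElem?_append_left hjn, Nat.mod_eq_of_lt hjn]
      · have hj' : j - numbers.length < m * numbers.length := by
          have hms : (m + 1) * numbers.length = m * numbers.length + numbers.length := by ring
          omega
        rw [List.getElem?_append_right (by omega)]
        rw [ih _ hj']
        congr 1
        conv_rhs => rw [show j = numbers.length + (j - numbers.length) by omega]
        rw [Nat.add_mod_left]

theorem solution_spec : Claim_equal_solution := by
  intro numbers k _ hpre
  obtain ⟨hne, hlo, hhi⟩ := hpre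
  unfold Spec_solution solution solution_alt
  have hn : 0 < numbers.length := List.length_pos_iff.mpr hne
  have hbuild : buildArr numbers 2002 [] = rep numbers (2000 / numbers.length + 1) := by
    have hd : 2000 / numbers.length ≤ 2000 := Nat.div_le_self _ _
    have := build_eq numbers hne 2002 0 (by omega) (Nat.zero_le _)
    simpa [rep] using this
  rw [hbuild]
  set n := numbers.length with hn_def
  set M := 2000 / n + 1 with hM
  set i : Int := 2 * k - 2 with hi
  have hLen : (rep numbers M).length = M * n := rep_length numbers M
  have hmodB : PySem.Int.mod i (n : Int) = i % (n : Int) :=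
    PySem.Int.mod_eq_emod_of_pos (by exact_mod_cast hn)
  have hmod_lo : 0 ≤ i % (n : Int) := Int.emod_nonneg _ (by positivity)
  have hmod_hi : i % (n : Int) < (n : Int) := Int.emod_lt_of_pos _ (by exact_mod_cast hn)
  rw [hmodB]
  rw [PySem.List.pyGetD_eq_getElem numbers 0 hmod_lo (by simpa using hmod_hi)]
  -- L in Pre_ is n * M; note M * n = n * M
  have hL : ((n * M : Nat) : Int) = ((M * n : Nat) : Int) := by rw [Nat.mul_comm]
  rw [hL] at hlo hhi
  by_cases hpos : 0 ≤ i
  · rw [PySem.List.pyGetD_eq_getElem _ 0 hpos (by rw [hLen]; exact_mod_cast hhi)]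
    have hjlt : i.toNat < M * n := by omega
    have h1 := rep_getElem? numbers hne M i.toNat hjlt
    have hidx : (i % (n : Int)).toNat = i.toNat % n := by
      have he : i % (n : Int) = ((i.toNat % n : Nat) : Int) := by
        conv_lhs => rw [show i = ((i.toNat : Nat) : Int) from by omega]
        rw [Int.natCast_mod]
      omega
    rw [← hidx] at h1
    rw [List.getElem?_eq_getElem (by rw [hLen]; exact hjlt)] at h1
    rw [List.getElem?_eq_getElem (show (i % (n : Int)).toNat < numbers.length from by omega)] at h1
    exact Option.some_injective _ h1
  · -- negative index: effective nat index is M*n - (-i).toNat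
    set kk : Nat := (-i).toNat with hkk
    have hkpos : 0 < kk := by omega
    have hkle : kk ≤ (rep numbers M).length := by rw [hLen]; omega
    have hneg : i = -(kk : Int) := by omega
    have hgd : PySem.List.pyGetD (rep numbers M) i 0
        = (rep numbers M)[(rep numbers M).length - kk] := by
      conv_lhs => rw [hneg]
      exact PySem.List.pyGetD_neg_natCast _ _ _ hkpos hkle
    rw [hgd]
    apply Option.some_injective
    rw [← List.getElem?_eq_getElem, ← List.getElem?_eq_getElem]
    have hidx : (i % (n : Int)).toNat = (M * n - kk) % n := by
      have hje : ((M * n - kk : Nat) : Int) = ((M * n : Nat) : Int) + i := by omega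
      have hmn : ((M * n : Nat) : Int) = ((n : Nat) : Int) * (M : Int) := by push_cast; ring
      have hjm : (((M * n - kk) % n : Nat) : Int) = i % ((n : Nat) : Int) := by
        rw [Int.natCast_mod, hje, hmn, add_comm, Int.add_mul_emod_self_left]
      omega
    have hM1 : 0 < M := by rw [hM]; exact Nat.succ_pos _
    have hMn : 0 < M * n := Nat.mul_pos hM1 hn
    rw [hidx, show (rep numbers M).length - kk = M * n - kk from by rw [hLen]]
    exact rep_getElem? numbers hne M (M * n - kk) (by rw [← hn_def]; omega)

-- ===== VERDICT (by name: the statement is the Claim_ definition above) =====
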